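-- pv_equiv track=rewrite | github.com/yfcyfc123234/api2cursor | scripts/benchmark_stream_latency.py | _collapse_duplicate_slashes
-- ===== SOURCE A (Python) =====
-- def _collapse_duplicate_slashes(url: str) -> str:
--     """把 https://host//v1/... 规范成单斜杠路径（不破坏 https://）。"""
--     url = url.strip()
--     if "://" not in url:
--         return url
--     scheme, rest = url.split("://", 1)
--     if "/" not in rest:
--         return url
--     host, path = rest.split("/", 1)
--     while path.startswith("/"):
--         path = path[1:]
--     return f"{scheme}://{host}/{path}"
-- ===== SOURCE B (Python) =====
-- def _collapse_duplicate_slashes(url: str) -> str: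
--     # Single left-to-right scan: find "://", then the first "/" after the host,
--     # then skip the run of duplicate slashes; no split/rejoin.
--     s = url.strip()
--     n = len(s)
--     i = 0
--     while i < n:                      # scan for "://"
--         if s.startswith("://", i):
--             j = i + 3
--             while j < n:              # scan the host for the first "/"
--                 if s[j] == "/":
--                     k = j + 1
--                     while k < n and s[k] == "/":   # collapse the slash run
--                         k += 1
--                     return s[: j + 1] + s[k:]
--                 j += 1
--             return s
--         i += 1
--     return s
-- ===== Notes on version B (the rewrite author's own statement) =====
-- stated objective: alternative
-- what changed: Replaces A's strip/split-on-scheme-separator/split-on-slash/while-strip/f-string rejoin with a single left-to-right scan of the stripped string that locates the scheme separator, then the first slash after the host, skips the run of duplicate slashes and splices the remainder back on.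
import Mathlib
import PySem

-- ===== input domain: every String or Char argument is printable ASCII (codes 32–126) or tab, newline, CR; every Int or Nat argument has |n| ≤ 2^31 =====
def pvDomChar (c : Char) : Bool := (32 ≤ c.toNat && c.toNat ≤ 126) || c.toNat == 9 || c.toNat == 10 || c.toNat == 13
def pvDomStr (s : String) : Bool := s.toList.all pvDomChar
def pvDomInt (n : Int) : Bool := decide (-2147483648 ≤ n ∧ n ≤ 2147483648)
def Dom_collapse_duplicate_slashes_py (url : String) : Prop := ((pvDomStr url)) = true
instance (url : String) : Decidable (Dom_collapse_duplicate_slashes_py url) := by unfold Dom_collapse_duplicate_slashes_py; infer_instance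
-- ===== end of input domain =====

-- B replaces A's strip/split/while/rejoin with a single left-to-right scan of the
-- stripped string (alternative decomposition; same result, similar cost).


-- ===== PORT A =====
-- `while path.startswith("/"): path = path[1:]` — startswith("/") = first char is '/',
-- path[1:] = tail; ported as the obvious structural recursion.
def pvAStripLoop : List Char → List Char
  | [] => []
  | c :: cs => if c = '/' then pvAStripLoop cs else c :: cs

-- body of A after `url = url.strip()`; `scheme, rest = url.split("://", 1)` — a split
-- with maxsplit=1 whose separator occurs yields exactly two pieces, read with getD.
def pvABody (t : List Char) : List Char :=
  if PySem.Chars.isIn [':', '/', '/'] t = false then t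
  else
    let parts := PySem.Chars.splitOnMax t [':', '/', '/'] 1
    let scheme := parts.getD 0 []
    let rest := parts.getD 1 []
    if PySem.Chars.isIn ['/'] rest = false then t
    else
      let parts2 := PySem.Chars.splitOnMax rest ['/'] 1
      let host := parts2.getD 0 []
      let path := parts2.getD 1 []
      scheme ++ [':', '/', '/'] ++ host ++ ['/'] ++ pvAStripLoop path

def collapse_duplicate_slashes_py (url : String) : String :=
  String.ofList (pvABody (PySem.Chars.strip url.toList))

-- ===== PORT B =====
-- inner scan of Source B: walk the host, at the first '/' keep it and skip the run of
-- duplicate slashes (the k-loop = dropWhile); none = the loop ran off the end (return s).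
def pvBHost : List Char → Option (List Char)
  | [] => none
  | c :: cs => if c = '/' then some ('/' :: cs.dropWhile (· = '/')) else (pvBHost cs).map (c :: ·)

-- outer scan of Source B: walk until `s.startswith("://", i)`; the retained prefix s[:..]
-- is the chars consed back on; none = "://" never found (return s).
def pvBScan : List Char → Option (List Char)
  | [] => none
  | c :: cs =>
    if [':', '/', '/'].isPrefixOf (c :: cs) then
      (pvBHost (cs.drop 2)).map (fun h => ':' :: '/' :: '/' :: h)
    else (pvBScan cs).map (c :: ·)

def collapse_duplicate_slashes_py_alt (url : String) : String :=
  let t := PySem.Chars.strip url.toList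
  String.ofList ((pvBScan t).getD t)

-- ===== PRECONDITION & SPEC =====
def Spec_collapse_duplicate_slashes_py (url : String) (out : String) : Prop := out = collapse_duplicate_slashes_py_alt url
instance (url : String) (out : String) : Decidable (Spec_collapse_duplicate_slashes_py url out) := by unfold Spec_collapse_duplicate_slashes_py; infer_instance

-- ===== CLAIM (what is proved, stated in full; the proofs are below) =====
def Claim_equal_collapse_duplicate_slashes_py : Prop := ∀ (url : String), Dom_collapse_duplicate_slashes_py url → Spec_collapse_duplicate_slashes_py url (collapse_duplicate_slashes_py url)

-- ===== LEMMAS AND PROOFS =====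

-- reference first-occurrence split used by the proofs only
def pvSplit1 (sep : List Char) : List Char → Option (List Char × List Char)
  | [] => none
  | c :: rest =>
    if sep.isPrefixOf (c :: rest) then some ([], (c :: rest).drop sep.length)
    else (pvSplit1 sep rest).map (fun p => (c :: p.1, p.2))

theorem pvSplit1_isSome_iff (sep : List Char) (hsep : sep ≠ []) :
    ∀ l : List Char, (pvSplit1 sep l).isSome ↔ ∃ j, sep <+: l.drop j := by
  intro l
  induction l with
  | nil =>
    constructor
    · intro h; simp [pvSplit1] at h
    · rintro ⟨j, hj⟩
      simp only [List.drop_nil, List.prefix_nil] at hj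
      exact absurd hj hsep
  | cons c rest ih =>
    by_cases hp : sep.isPrefixOf (c :: rest)
    · constructor
      · intro _
        exact ⟨0, by simpa using List.isPrefixOf_iff_prefix.mp hp⟩
      · intro _; simp [pvSplit1, hp]
    · rw [show pvSplit1 sep (c :: rest) = (pvSplit1 sep rest).map (fun p => (c :: p.1, p.2)) from by
        simp [pvSplit1, hp]]
      rw [Option.isSome_map, ih]
      constructor
      · rintro ⟨j, hj⟩; exact ⟨j + 1, by simpa using hj⟩
      · rintro ⟨j, hj⟩
        cases j with
        | zero =>
          exact absurd (List.isPrefixOf_iff_prefix.mpr (by simpa using hj)) hp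
        | succ j => exact ⟨j, by simpa using hj⟩

theorem pvGo_spec (sep : List Char) (hsep : sep ≠ []) :
    ∀ fuel l cur acc, l.length < fuel →
      PySem.Chars.splitOnMax.go sep fuel 1 l cur acc =
        acc.reverse ++
          (match pvSplit1 sep l with
            | none => [cur.reverse ++ l]
            | some p => [cur.reverse ++ p.1, p.2]) := by
  intro fuel
  induction fuel with
  | zero => intro l cur acc h; omega
  | succ fuel ih =>
    intro l cur acc h
    cases l with
    | nil => simp [PySem.Chars.splitOnMax.go, pvSplit1]
    | cons c rest =>
      by_cases hp : sep.isPrefixOf (c :: rest)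
      · have hlen : sep.length ≥ 1 := by
          cases sep with | nil => simp at hsep | cons _ _ => simp
        have hdrop : ((c :: rest).drop sep.length).length < fuel := by
          simp only [List.length_drop, List.length_cons] at *
          omega
        rw [PySem.Chars.splitOnMax.go]
        simp only [hp, if_pos, if_neg (by omega : ¬ (1 : Nat) = 0)]
        cases hfl : (c :: rest).drop sep.length with
        | nil =>
          cases fuel with
          | zero => rw [hfl] at hdrop; simp at hdrop
          | succ fuel' =>
            simp only [Nat.sub_self]
            rw [PySem.Chars.splitOnMax.go]
            simp [pvSplit1, hp, hfl]
            omega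
        | cons d ds =>
          cases fuel with
          | zero => rw [hfl] at hdrop; simp at hdrop
          | succ fuel' =>
            simp only [Nat.sub_self]
            rw [PySem.Chars.splitOnMax.go]
            simp [pvSplit1, hp, hfl]
      · have h' : rest.length < fuel := by simp at h; omega
        rw [PySem.Chars.splitOnMax.go]
        simp only [hp, Bool.false_eq_true, if_false, if_neg (by omega : ¬ (1 : Nat) = 0)]
        rw [ih rest (c :: cur) acc h']
        cases hs : pvSplit1 sep rest with
        | none => simp [pvSplit1, hp, hs]
        | some p => simp [pvSplit1, hp, hs]

theorem pvIsIn_iff_split1 (sep : List Char) (hsep : sep ≠ []) (l : List Char) :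
    PySem.Chars.isIn sep l = true ↔ (pvSplit1 sep l).isSome := by
  rw [pvSplit1_isSome_iff sep hsep l, ← PySem.Chars.exists_prefix_drop_iff_isIn]

-- splitOnMax's scanner, specialised to maxsplit = 1, in terms of pvSplit1
theorem pvSplitOnMax_one (sep : List Char) (hsep : sep ≠ []) (l : List Char) :
    PySem.Chars.splitOnMax l sep 1 =
      (match pvSplit1 sep l with
        | none => [l]
        | some p => [p.1, p.2]) := by
  rw [PySem.Chars.splitOnMax]
  rw [if_neg (by omega : ¬ (1 : Int) < 0)]
  have h1 : (1 : Int).toNat = 1 := rfl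
  rw [h1, pvGo_spec sep hsep (l.length + 1) l [] [] (by omega)]
  cases hs : pvSplit1 sep l with
  | none => simp
  | some p => simp

theorem pvAStripLoop_eq_dropWhile : ∀ p : List Char, pvAStripLoop p = p.dropWhile (· = '/') := by
  intro p
  induction p with
  | nil => rfl
  | cons c cs ih =>
    by_cases h : c = '/'
    · simp [pvAStripLoop, List.dropWhile, h, ih]
    · simp [pvAStripLoop, List.dropWhile, h]

theorem pvBHost_spec : ∀ r : List Char,
    pvBHost r =
      (match pvSplit1 ['/'] r with
        | none => none
        | some p => some (p.1 ++ '/' :: p.2.dropWhile (· = '/'))) := by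
  intro r
  induction r with
  | nil => rfl
  | cons c cs ih =>
    by_cases h : c = '/'
    · subst h
      simp [pvBHost, pvSplit1, List.isPrefixOf]
    · have hp : ¬ (['/'].isPrefixOf (c :: cs) = true) := by
        simp only [List.isPrefixOf_iff_prefix, List.cons_prefix_cons, List.nil_prefix, and_true]
        exact fun he => h he.symm
      simp only [pvBHost, if_neg h, ih, pvSplit1, hp, Bool.false_eq_true, if_false]
      cases hs : pvSplit1 ['/'] cs with
      | none => simp
      | some p => simp

theorem pvBScan_spec : ∀ t : List Char,
    pvBScan t =
      (match pvSplit1 [':', '/', '/'] t with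
        | none => none
        | some p =>
            (pvBHost p.2).map (fun h => p.1 ++ ':' :: '/' :: '/' :: h)) := by
  intro t
  induction t with
  | nil => rfl
  | cons c cs ih =>
    by_cases hp : [':', '/', '/'].isPrefixOf (c :: cs)
    · have hshape : c = ':' ∧ ∃ ds, cs = '/' :: '/' :: ds := by
        have := List.isPrefixOf_iff_prefix.mp hp
        rcases this with ⟨u, hu⟩
        cases cs with
        | nil => simp at hu
        | cons d ds =>
          cases ds with
          | nil => simp at hu
          | cons e es =>
            simp at hu
            refine ⟨hu.1.symm, es, ?_⟩
            rw [← hu.2.1, ← hu.2.2.1]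
      obtain ⟨hc, ds, hcs⟩ := hshape
      subst hc; subst hcs
      simp [pvBScan, pvSplit1, hp]
    · simp only [pvBScan, hp, Bool.false_eq_true, if_false, pvSplit1, ih]
      cases hs : pvSplit1 [':', '/', '/'] cs with
      | none => simp
      | some p => cases hb : pvBHost p.2 <;> simp [hb]

theorem pvMain (t : List Char) : pvABody t = (pvBScan t).getD t := by
  have hsep3 : ([':', '/', '/'] : List Char) ≠ [] := by simp
  have hsl : (['/'] : List Char) ≠ [] := by simp
  rw [pvBScan_spec]
  unfold pvABody
  cases hs : pvSplit1 [':', '/', '/'] t with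
  | none =>
    have hin : PySem.Chars.isIn [':', '/', '/'] t = false := by
      have h := pvIsIn_iff_split1 _ hsep3 t
      rw [hs] at h; simpa using h
    simp [hin]
  | some p =>
    have hin : PySem.Chars.isIn [':', '/', '/'] t = true := by
      rw [pvIsIn_iff_split1 _ hsep3 t, hs]; rfl
    rw [pvSplitOnMax_one _ hsep3 t, hs]
    simp only [hin, Bool.true_eq_false, if_false, List.getD_cons_zero, List.getD_cons_succ]
    rw [pvBHost_spec]
    cases hs2 : pvSplit1 ['/'] p.2 with
    | none =>
      have hin2 : PySem.Chars.isIn ['/'] p.2 = false := by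
        have h := pvIsIn_iff_split1 _ hsl p.2
        rw [hs2] at h; simpa using h
      simp [hin2]
    | some q =>
      have hin2 : PySem.Chars.isIn ['/'] p.2 = true := by
        rw [pvIsIn_iff_split1 _ hsl p.2, hs2]; rfl
      rw [pvSplitOnMax_one _ hsl p.2, hs2]
      simp [hin2, pvAStripLoop_eq_dropWhile]

-- ===== VERDICT (by name: the statement is the Claim_ definition above) =====
theorem collapse_duplicate_slashes_py_spec : Claim_equal_collapse_duplicate_slashes_py := by
  intro url _
  unfold Spec_collapse_duplicate_slashes_py collapse_duplicate_slashes_py collapse_duplicate_slashes_py_alt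
  rw [pvMain]
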